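-- pv_equiv track=rewrite | github.com/981377660LMT/algorithm-study | 0_数组/数组api/数组删除与插入.py | insertMany
-- ===== SOURCE A (Python) =====
-- from collections import defaultdict
-- from typing import List
--
-- def insertMany(nums: List[int], indexes: List[int], values: List[int]) -> List[int]:
--     """
--     非原地插入 多个位置插入多个元素
--
--     如果插入的位置超出数组最大索引，则被顺序插入到最后
--     """
--     assert len(indexes) == len(values), "indexes and values must have the same length"
--
--     n = len(nums)
--     inner, outer = defaultdict(list), []
--     for i, v in zip(indexes, values):
--         if i < n:
--             inner[i].append(v)
--         else:
--             outer.append(v)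
--
--     res = []
--     for i in range(n):
--         if i in inner:
--             res.extend(inner[i])
--         res.append(nums[i])
--
--     res.extend(outer)
--     return res
-- ===== SOURCE B (Python) =====
-- from typing import List
--
--
-- def insertMany(nums: List[int], indexes: List[int], values: List[int]) -> List[int]:
--     """Per-position scan: for each array slot emit the values aimed at it, then
--     the element; finally the values aimed past the end, in input order."""
--     assert len(indexes) == len(values), "indexes and values must have the same length"
--
--     n = len(nums)
--     pairs = list(zip(indexes, values))
--     res = []
--     for i, x in enumerate(nums):
--         res += [v for k, v in pairs if k == i]
--         res.append(x)
--     res += [v for k, v in pairs if k >= n]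
--     return res
-- ===== Notes on version B (the rewrite author's own statement) =====
-- stated objective: simpler
-- what changed: Replaces A's defaultdict grouping pass plus dict-membership lookups by a direct per-position comprehension scan of the zipped (index, value) pairs, eliminating the dictionary entirely.
import Mathlib
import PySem

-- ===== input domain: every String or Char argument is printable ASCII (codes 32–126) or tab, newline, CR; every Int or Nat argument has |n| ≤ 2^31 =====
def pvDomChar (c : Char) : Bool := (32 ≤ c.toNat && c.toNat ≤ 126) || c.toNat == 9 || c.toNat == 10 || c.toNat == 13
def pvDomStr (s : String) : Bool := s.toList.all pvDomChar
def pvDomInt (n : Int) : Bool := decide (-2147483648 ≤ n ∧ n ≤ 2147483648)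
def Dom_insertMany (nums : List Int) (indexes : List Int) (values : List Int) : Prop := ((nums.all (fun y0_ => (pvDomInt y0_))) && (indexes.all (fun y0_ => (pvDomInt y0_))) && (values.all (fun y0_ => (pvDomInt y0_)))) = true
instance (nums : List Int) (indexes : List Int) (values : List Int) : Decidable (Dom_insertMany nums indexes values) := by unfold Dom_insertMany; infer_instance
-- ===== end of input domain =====

-- B replaces A's defaultdict grouping by a direct per-position scan of the (index, value)
-- pairs — shorter and dictionary-free (objective: simpler; not faster: O(n·m) vs O(n+m)).

-- ===== PORT A =====
def insertMany (nums : List Int) (indexes : List Int) (values : List Int) : List Int :=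
  let n : Int := nums.length
  -- for i, v in zip(indexes, values): if i < n: inner[i].append(v) else: outer.append(v)
  let st := (indexes.zip values).foldl
    (fun (st : PySem.Dict Int (List Int) × List Int) p =>
      if p.1 < n then (st.1.modify p.1 [] (fun l => l ++ [p.2]), st.2)
      else (st.1, st.2 ++ [p.2]))
    (PySem.Dict.empty, [])
  let inner := st.1
  let outer := st.2
  -- for i in range(n): if i in inner: res.extend(inner[i]); res.append(nums[i])
  let res := (PySem.List.pyRange 0 n 1).foldl
    (fun res i =>
      (if inner.contains i then res ++ inner.getD i [] else res)
        ++ [PySem.List.pyGetD nums i 0])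
    []
  res ++ outer

-- ===== PORT B =====
def insertMany_alt (nums : List Int) (indexes : List Int) (values : List Int) : List Int :=
  let n : Int := nums.length
  let pairs := indexes.zip values
  let res := (PySem.List.enumerate nums).foldl
    (fun res p =>
      res ++ ((pairs.filter (fun q => q.1 == p.1)).map (fun q => q.2)) ++ [p.2])
    []
  res ++ ((pairs.filter (fun q => q.1 ≥ n)).map (fun q => q.2))

-- ===== PRECONDITION & SPEC =====
-- Pre_ excludes exactly the inputs where A's assert raises (AssertionError).
def Pre_insertMany (nums : List Int) (indexes : List Int) (values : List Int) : Prop :=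
  indexes.length = values.length
instance (nums : List Int) (indexes : List Int) (values : List Int) : Decidable (Pre_insertMany nums indexes values) := by unfold Pre_insertMany; infer_instance

def pvWitness_insertMany : List Int × List Int × List Int := ([1, 2, 3], [0, 2, 5], [10, 20, 30])

def Spec_insertMany (nums : List Int) (indexes : List Int) (values : List Int) (out : List Int) : Prop := out = insertMany_alt nums indexes values
instance (nums : List Int) (indexes : List Int) (values : List Int) (out : List Int) : Decidable (Spec_insertMany nums indexes values out) := by unfold Spec_insertMany; infer_instance

-- ===== CLAIM (what is proved, stated in full; the proofs are below) =====
def Claim_equal_insertMany : Prop := ∀ (nums : List Int) (indexes : List Int) (values : List Int), Dom_insertMany nums indexes values → Pre_insertMany nums indexes values → Spec_insertMany nums indexes values (insertMany nums indexes values)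

-- ===== LEMMAS AND PROOFS =====

-- A's single mixed loop splits into the dict-grouping fold over the in-range pairs and the
-- plain collection of the out-of-range values.
theorem pv_split_fold (n : Int) (l : List (Int × Int)) (d : PySem.Dict Int (List Int)) (o : List Int) :
    l.foldl
      (fun (st : PySem.Dict Int (List Int) × List Int) p =>
        if p.1 < n then (st.1.modify p.1 [] (fun l => l ++ [p.2]), st.2)
        else (st.1, st.2 ++ [p.2])) (d, o)
    = ((l.filter (fun p => p.1 < n)).foldl
         (fun d p => d.modify p.1 [] (fun l => l ++ [p.2])) d,
       o ++ (l.filter (fun p => ¬ p.1 < n)).map (fun p => p.2)) := by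
  induction l generalizing d o with
  | nil => simp
  | cons p t ih =>
    by_cases hp : p.1 < n
    · simp [hp, ih]
    · have hp' : n ≤ p.1 := by omega
      simp [hp, hp', ih]

theorem insertMany_spec' (nums indexes values : List Int) :
    insertMany nums indexes values = insertMany_alt nums indexes values := by
  unfold insertMany insertMany_alt
  dsimp only
  rw [pv_split_fold]
  set n : Int := (nums.length : Int) with hn
  set pairs := indexes.zip values with hpairs
  set inl := pairs.filter (fun p => p.1 < n) with hinl
  set inner := inl.foldl (fun d p => d.modify p.1 [] (fun l => l ++ [p.2]))
      (PySem.Dict.empty : PySem.Dict Int (List Int)) with hinner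
  have hcontains : ∀ i : Int, inner.contains i = true ↔
      ∃ v, (i, v) ∈ inl := by
    intro i
    rw [PySem.Dict.contains_iff_mem_keys, hinner]
    have := PySem.Dict.keys_foldl_modify_key inl (fun p => p.1) ([] : List Int)
      (fun d p l => l ++ [p.2]) (PySem.Dict.empty : PySem.Dict Int (List Int))
    simp only at this
    rw [this]
    simp only [PySem.Set.mem_update, PySem.Dict.keys_empty, List.not_mem_nil, false_or, List.mem_map]
    constructor
    · rintro ⟨q, hq, rfl⟩; exact ⟨q.2, hq⟩
    · rintro ⟨v, hv⟩; exact ⟨(i, v), hv, rfl⟩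
  -- the two result loops agree
  have hloop : (PySem.List.pyRange 0 n 1).foldl
      (fun res i =>
        (if inner.contains i then res ++ inner.getD i [] else res)
          ++ [PySem.List.pyGetD nums i 0]) []
      = (PySem.List.enumerate nums).foldl
      (fun res p =>
        res ++ ((pairs.filter (fun q => q.1 == p.1)).map (fun q => q.2)) ++ [p.2]) [] := by
    rw [PySem.List.enumerate_eq_map_pyRange nums 0, List.foldl_map]
    have hlen : PySem.List.len nums = n := by simp [PySem.List.len_eq, hn]
    rw [hlen]
    apply PySem.List.foldl_congr_mem
    intro acc i hi
    have hi' : 0 ≤ i ∧ i < n := PySem.List.mem_pyRange_one.mp hi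
    -- the group stored at i is the filter of the pairs aimed at i
    have hgroup : inner.getD i [] = (pairs.filter (fun q => q.1 == i)).map (fun q => q.2) := by
      rw [hinner]
      have := PySem.Dict.getD_foldl_modify_append inl
        (PySem.Dict.empty : PySem.Dict Int (List Int)) i
      rw [this, PySem.Dict.getD_empty, List.nil_append]
      rw [hinl, List.filter_filter]
      congr 1
      apply List.filter_congr
      intro q _
      by_cases hq : q.1 = i
      · simp [hq, hi'.2]
      · simp [hq]
    by_cases hc : inner.contains i = true
    · simp only [hc, if_true, hgroup]
    · have hnotmem : ¬ ∃ v, (i, v) ∈ inl := fun h => hc ((hcontains i).mpr h)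
      have hempty : pairs.filter (fun q => q.1 == i) = [] := by
        rw [List.filter_eq_nil_iff]
        intro q hq
        simp only [beq_iff_eq]
        intro hqi
        refine hnotmem ⟨q.2, ?_⟩
        rw [hinl]
        refine List.mem_filter.mpr ⟨?_, by simp [hi'.2]⟩
        have : q = (i, q.2) := by rw [← hqi]
        rw [← this]; exact hq
      simp [hc, hempty]
  rw [hloop]
  congr 1
  show List.map (fun p => p.2) (List.filter (fun p => decide ¬p.1 < n) pairs)
      = List.map (fun q => q.2) (List.filter (fun q => decide (q.1 ≥ n)) pairs)
  congr 1
  apply List.filter_congr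
  intro q _
  simp only [decide_eq_decide]
  omega

-- ===== VERDICT (by name: the statement is the Claim_ definition above) =====
theorem insertMany_spec : Claim_equal_insertMany := by
  intro nums indexes values _ _
  unfold Spec_insertMany
  exact insertMany_spec' nums indexes values
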